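-- pv_equiv track=rewrite | github.com/xinyuwufei/MHXX-MHGU-PlayerNameEdit | mhgu_name_edit.py | is_half_width_form
-- ===== SOURCE A (Python) =====
-- def is_half_width_form(ustring):
--
-- 	for uchar in ustring:
-- 		inside_code = ord(uchar)
-- 		if inside_code == 0x0020:
-- 			continue
-- 		else:
-- 			if not (0x0021 <= inside_code and inside_code <= 0x7e):
-- 				return False
-- 	return True
-- ===== SOURCE B (Python) =====
-- def is_half_width_form(ustring):
--     codes = [ord(c) for c in ustring]
--     if not codes:
--         return True
--     return min(codes) >= 0x20 and max(codes) <= 0x7e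
-- ===== Notes on version B (the rewrite author's own statement) =====
-- stated objective: alternative
-- what changed: Replaces A's short-circuiting per-character branch loop with one materialization of the code points and a min/max aggregate compared against the range bounds.
import Mathlib
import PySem

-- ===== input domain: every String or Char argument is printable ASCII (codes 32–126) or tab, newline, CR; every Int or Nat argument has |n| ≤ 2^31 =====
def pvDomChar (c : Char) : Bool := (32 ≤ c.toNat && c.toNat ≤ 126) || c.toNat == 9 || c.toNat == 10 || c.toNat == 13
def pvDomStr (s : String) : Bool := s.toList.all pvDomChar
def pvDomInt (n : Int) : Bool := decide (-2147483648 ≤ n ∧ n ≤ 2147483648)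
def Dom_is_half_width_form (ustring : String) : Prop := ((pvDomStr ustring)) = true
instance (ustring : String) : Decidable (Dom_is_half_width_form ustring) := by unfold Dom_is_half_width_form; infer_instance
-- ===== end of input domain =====

-- B replaces A's short-circuiting per-character loop with a min/max aggregate over the code points (alternative decomposition, same cost).


-- ===== PORT A =====
-- loop with early return: skip 0x20, reject when code outside 0x21..0x7e
def pvHWLoop : List Char → Bool
  | [] => true
  | c :: rest =>
      let inside_code := c.toNat
      if inside_code = 0x20 then pvHWLoop rest
      else if ¬ (0x21 ≤ inside_code ∧ inside_code ≤ 0x7e) then false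
      else pvHWLoop rest

def is_half_width_form (ustring : String) : Bool := pvHWLoop ustring.toList

-- ===== PORT B =====
def is_half_width_form_alt (ustring : String) : Bool :=
  let codes := ustring.toList.map Char.toNat
  match codes with
  | [] => true
  | c :: cs => decide (0x20 ≤ cs.foldl min c) && decide (cs.foldl max c ≤ 0x7e)

-- ===== PRECONDITION & SPEC =====
def Spec_is_half_width_form (ustring : String) (out : Bool) : Prop := out = is_half_width_form_alt ustring
instance (ustring : String) (out : Bool) : Decidable (Spec_is_half_width_form ustring out) := by unfold Spec_is_half_width_form; infer_instance

-- ===== CLAIM (what is proved, stated in full; the proofs are below) =====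
def Claim_equal_is_half_width_form : Prop := ∀ (ustring : String), Dom_is_half_width_form ustring → Spec_is_half_width_form ustring (is_half_width_form ustring)

-- ===== LEMMAS AND PROOFS =====

-- A's loop accepts exactly the lists whose code points all lie in 0x20..0x7e
theorem pvHWLoop_eq_all (l : List Char) :
    pvHWLoop l = l.all (fun c => decide (0x20 ≤ c.toNat ∧ c.toNat ≤ 0x7e)) := by
  induction l with
  | nil => rfl
  | cons c rest ih =>
      simp only [pvHWLoop, List.all_cons, ih]
      by_cases h20 : c.toNat = 0x20
      · simp [h20]
      · by_cases hr : 0x21 ≤ c.toNat ∧ c.toNat ≤ 0x7e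
        · have : 0x20 ≤ c.toNat ∧ c.toNat ≤ 0x7e := ⟨by omega, hr.2⟩
          simp [h20, hr, this]
        · have : ¬ (0x20 ≤ c.toNat ∧ c.toNat ≤ 0x7e) := by omega
          simp [h20, hr, this]

theorem pv_le_foldl_min (n c : Nat) (cs : List Nat) :
    (n ≤ cs.foldl min c) ↔ (n ≤ c ∧ ∀ x ∈ cs, n ≤ x) := by
  induction cs generalizing c with
  | nil => simp
  | cons x xs ih =>
      simp only [List.foldl_cons, ih, List.mem_cons]
      constructor
      · rintro ⟨h1, h2⟩
        refine ⟨?_, ?_⟩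
        · exact le_trans h1 (min_le_left _ _)
        · rintro y (rfl | hy)
          · exact le_trans h1 (min_le_right _ _)
          · exact h2 y hy
      · rintro ⟨h1, h2⟩
        exact ⟨le_min h1 (h2 x (Or.inl rfl)), fun y hy => h2 y (Or.inr hy)⟩

theorem pv_foldl_max_le (n c : Nat) (cs : List Nat) :
    (cs.foldl max c ≤ n) ↔ (c ≤ n ∧ ∀ x ∈ cs, x ≤ n) := by
  induction cs generalizing c with
  | nil => simp
  | cons x xs ih =>
      simp only [List.foldl_cons, ih, List.mem_cons]
      constructor
      · rintro ⟨h1, h2⟩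
        refine ⟨le_trans (le_max_left _ _) h1, ?_⟩
        rintro y (rfl | hy)
        · exact le_trans (le_max_right _ _) h1
        · exact h2 y hy
      · rintro ⟨h1, h2⟩
        exact ⟨max_le h1 (h2 x (Or.inl rfl)), fun y hy => h2 y (Or.inr hy)⟩

-- ===== VERDICT (by name: the statement is the Claim_ definition above) =====
theorem is_half_width_form_spec : Claim_equal_is_half_width_form := by
  intro ustring _
  unfold Spec_is_half_width_form is_half_width_form is_half_width_form_alt
  rw [pvHWLoop_eq_all]
  cases h : ustring.toList.map Char.toNat with
  | nil =>
      have : ustring.toList = [] := List.map_eq_nil_iff.mp h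
      simp [this]
  | cons c cs =>
      simp only []
      rw [Bool.eq_iff_iff]
      simp only [List.all_eq_true, decide_eq_true_eq, Bool.and_eq_true,
        pv_le_foldl_min, pv_foldl_max_le]
      constructor
      · intro hall
        have hmem : ∀ x ∈ c :: cs, 0x20 ≤ x ∧ x ≤ 0x7e := by
          intro x hx
          rw [← h] at hx
          obtain ⟨ch, hch, rfl⟩ := List.mem_map.mp hx
          exact hall ch hch
        refine ⟨⟨(hmem c (List.mem_cons_self)).1, fun x hx => (hmem x (List.mem_cons_of_mem _ hx)).1⟩,
                ⟨(hmem c (List.mem_cons_self)).2, fun x hx => (hmem x (List.mem_cons_of_mem _ hx)).2⟩⟩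
      · rintro ⟨⟨hc1, hcs1⟩, ⟨hc2, hcs2⟩⟩ ch hch
        have : ch.toNat ∈ c :: cs := by
          rw [← h]; exact List.mem_map_of_mem hch
        rcases List.mem_cons.mp this with heq | hmem
        · exact ⟨heq ▸ hc1, heq ▸ hc2⟩
        · exact ⟨hcs1 _ hmem, hcs2 _ hmem⟩
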